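-- pv_equiv track=rewrite | github.com/Gdula/checkpoint | delete_even_elements.py | delete_even_elements_lower_than_x
-- ===== SOURCE A (Python) =====
-- def delete_even_elements_lower_than_x(numbers, x):
--     if len(numbers) == 0:
--         raise(ValueError)("Input list cannot be empty!")
--     else:
--         for i in numbers[:]:
--             if i % 2 == 0 and i<x:
--                 numbers.remove(i)
--         return numbers
-- ===== SOURCE B (Python) =====
-- def delete_even_elements_lower_than_x(numbers, x):
--     if len(numbers) == 0:
--         raise ValueError("Input list cannot be empty!")
--     w = 0
--     for v in numbers:
--         if not (v % 2 == 0 and v < x):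
--             numbers[w] = v
--             w += 1
--     del numbers[w:]
--     return numbers
-- ===== Notes on version B (the rewrite author's own statement) =====
-- stated objective: simpler
-- what changed: Replaces the repeated list.remove scans over a mutating list (driven by a copy of the input) with a single-pass in-place write-pointer compaction followed by one truncation.
import Mathlib
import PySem

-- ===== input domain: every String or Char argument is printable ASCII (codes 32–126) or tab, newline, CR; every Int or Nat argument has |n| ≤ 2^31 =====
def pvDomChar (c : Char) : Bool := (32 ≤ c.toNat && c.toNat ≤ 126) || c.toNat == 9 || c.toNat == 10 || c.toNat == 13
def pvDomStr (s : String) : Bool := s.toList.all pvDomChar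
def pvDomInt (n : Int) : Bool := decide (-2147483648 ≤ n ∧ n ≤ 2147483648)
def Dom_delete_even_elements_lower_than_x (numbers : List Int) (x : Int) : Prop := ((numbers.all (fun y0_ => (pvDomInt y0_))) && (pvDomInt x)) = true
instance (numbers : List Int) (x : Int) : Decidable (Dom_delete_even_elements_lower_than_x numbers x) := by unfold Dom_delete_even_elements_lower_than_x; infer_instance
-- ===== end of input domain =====

-- B replaces A's repeated list.remove scans with a single-pass in-place write-pointer
-- compaction (objective: simpler single pass). Both mutate the caller's list in place
-- and return it; equivalence here is about the returned value.

-- ===== PORT A =====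
-- A's for-loop over the copy numbers[:], removing the first occurrence of each
-- even i < x from the current list (remove? never fails here; getD is unreachable).
def pvDelA_loop (x : Int) (copy : List Int) (st : List Int) : List Int :=
  match copy with
  | [] => st
  | i :: rest =>
      pvDelA_loop x rest
        (if PySem.Int.mod i 2 == 0 && decide (i < x) then (PySem.List.remove? st i).getD st else st)

def delete_even_elements_lower_than_x (numbers : List Int) (x : Int) : List Int :=
  pvDelA_loop x numbers numbers

-- ===== PORT B =====
-- the test "not (v % 2 == 0 and v < x)" of Source B
def pvKeep (x v : Int) : Bool := !(PySem.Int.mod v 2 == 0 && decide (v < x))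

-- Source B's single pass: the fold state is the compacted write region numbers[0:w];
-- `del numbers[w:]` leaves exactly that region as the result.
def delete_even_elements_lower_than_x_alt (numbers : List Int) (x : Int) : List Int :=
  numbers.foldl (fun kept v => if pvKeep x v then kept ++ [v] else kept) []

-- ===== PRECONDITION & SPEC =====
-- A raises ValueError on the empty list (and so does B); excluded.
def Pre_delete_even_elements_lower_than_x (numbers : List Int) (x : Int) : Prop := numbers ≠ []
instance (numbers : List Int) (x : Int) : Decidable (Pre_delete_even_elements_lower_than_x numbers x) := by
  unfold Pre_delete_even_elements_lower_than_x; infer_instance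
def pvWitness_delete_even_elements_lower_than_x : List Int × Int := ([2, 3, 4], 4)

def Spec_delete_even_elements_lower_than_x (numbers : List Int) (x : Int) (out : List Int) : Prop :=
  out = delete_even_elements_lower_than_x_alt numbers x
instance (numbers : List Int) (x : Int) (out : List Int) : Decidable (Spec_delete_even_elements_lower_than_x numbers x out) := by
  unfold Spec_delete_even_elements_lower_than_x; infer_instance

-- ===== CLAIM (what is proved, stated in full; the proofs are below) =====
def Claim_equal_delete_even_elements_lower_than_x : Prop :=
  ∀ (numbers : List Int) (x : Int), Dom_delete_even_elements_lower_than_x numbers x →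
    Pre_delete_even_elements_lower_than_x numbers x →
    Spec_delete_even_elements_lower_than_x numbers x (delete_even_elements_lower_than_x numbers x)

-- ===== LEMMAS AND PROOFS =====

-- B's fold accumulates acc ++ filter
theorem pvB_eq_filter (x : Int) (l acc : List Int) :
    l.foldl (fun kept v => if pvKeep x v then kept ++ [v] else kept) acc
      = acc ++ l.filter (pvKeep x) := by
  induction l generalizing acc with
  | nil => simp
  | cons v rest ih =>
      by_cases h : pvKeep x v = true <;>
        simp [List.foldl, h, ih, List.append_assoc]

theorem pvRemove_mid (l1 l2 : List Int) (i : Int) (h : i ∉ l1) :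
    PySem.List.remove? (l1 ++ i :: l2) i = some (l1 ++ l2) := by
  induction l1 with
  | nil => simp [PySem.List.remove?_cons_self]
  | cons a t ih =>
      have ha : a ≠ i := by intro e; exact h (by simp [e])
      have ht : i ∉ t := fun m => h (List.mem_cons_of_mem _ m)
      rw [List.cons_append, PySem.List.remove?_cons_of_ne _ ha, ih ht]
      rfl

-- the loop condition of A is the negation of pvKeep
theorem pvCond_eq (x i : Int) :
    (PySem.Int.mod i 2 == 0 && decide (i < x)) = !(pvKeep x i) := by
  simp [pvKeep]

-- loop invariant: state = filter(processed) ++ remaining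
theorem pvA_inv (x : Int) (rest pre : List Int) :
    pvDelA_loop x rest (pre.filter (pvKeep x) ++ rest) = (pre ++ rest).filter (pvKeep x) := by
  induction rest generalizing pre with
  | nil => simp [pvDelA_loop]
  | cons i rs ih =>
      rw [pvDelA_loop, pvCond_eq]
      by_cases h : pvKeep x i = true
      · rw [h]
        have := ih (pre ++ [i])
        simp only [List.filter_append, List.filter_cons, h, List.filter_nil,
          List.append_nil, List.append_assoc, List.cons_append, List.nil_append] at this ⊢
        simpa using this
      · rw [Bool.not_eq_true] at h
        rw [h]
        have hni : i ∉ pre.filter (pvKeep x) := by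
          intro m
          have hk := List.of_mem_filter m
          rw [hk] at h; exact absurd h (by simp)
        have hrem := pvRemove_mid (pre.filter (pvKeep x)) rs i hni
        have := ih (pre ++ [i])
        simp only [List.filter_append, List.filter_cons, h, List.filter_nil,
          List.append_nil, List.append_assoc, List.cons_append, List.nil_append] at this ⊢
        simpa [hrem] using this

-- ===== VERDICT (by name: the statement is the Claim_ definition above) =====
theorem delete_even_elements_lower_than_x_spec : Claim_equal_delete_even_elements_lower_than_x := by
  intro numbers x _ _
  unfold Spec_delete_even_elements_lower_than_x
  unfold delete_even_elements_lower_than_x delete_even_elements_lower_than_x_alt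
  have hA := pvA_inv x numbers []
  simp only [List.filter_nil, List.nil_append] at hA
  rw [hA, pvB_eq_filter]
  simp
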